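-- pv_equiv track=rewrite | github.com/motleytech/pythonTimsort | timsort.py | gallop_left
-- ===== SOURCE A (Python) =====
-- def gallop_left(key, a, n, hint):
--     assert 0 <= hint < n
--
--     ofs = 1
--     lastofs = 0
--
--     if a[hint] < key:
--         maxofs = n - hint
--         while ofs < maxofs:
--             if a[ofs + hint] < key:
--                 lastofs = ofs
--                 ofs = (ofs << 1) + 1
--                 if ofs <= 0:
--                     ofs = maxofs
--             else:
--                 break
--         if ofs > maxofs:
--             ofs = maxofs
--         lastofs += hint
--         ofs += hint
--     else:
--         maxofs = hint + 1
--         while ofs < maxofs: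
--             if a[hint - ofs] < key:
--                 break
--             lastofs = ofs
--             ofs = (ofs << 1) + 1
--             if ofs <= 0:
--                 ofs = maxofs
--         if ofs > maxofs:
--             ofs = maxofs
--         k = lastofs
--         lastofs = hint - ofs
--         ofs = hint - k
--
--     assert -1 <= lastofs < ofs <= n
--
--     lastofs += 1
--     while lastofs < ofs:
--         m = lastofs + ((ofs - lastofs) >> 1)
--
--         if a[m] < key:
--             lastofs = m + 1
--         else:
--             ofs = m
--
--     assert lastofs == ofs
--     return ofs
-- ===== SOURCE B (Python) =====
-- def _gallop(ok, t):
--     while ok(t):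
--         t = 2 * t + 1
--     return t
--
-- def _bisect(key, a, lo, hi):
--     if lo >= hi:
--         return lo
--     m = (lo + hi) >> 1
--     if a[m] < key:
--         return _bisect(key, a, m + 1, hi)
--     return _bisect(key, a, lo, m)
--
-- def gallop_left(key, a, n, hint):
--     assert 0 <= hint < n
--     if a[hint] < key:
--         t = _gallop(lambda u: hint + u < n and a[hint + u] < key, 1)
--         lo, hi = hint + (t >> 1) + 1, min(hint + t, n)
--     else:
--         t = _gallop(lambda u: u <= hint and not a[hint - u] < key, 1)
--         lo, hi = max(hint - t, -1) + 1, hint - (t >> 1)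
--     return _bisect(key, a, lo, hi)
-- ===== Notes on version B (the rewrite author's own statement) =====
-- stated objective: simpler
-- what changed: A's gallop probe sequence is observable on unsorted input, so B keeps the same probe positions but a different decomposition: one direction-generic predicate-driven galloping helper whose single stopping offset t yields both bracket ends in closed form (previous offset = t>>1, eliminating A's lastofs/clamp/overflow state machine and the offset-to-index translation), followed by a recursive bisect helper in place of A's second while loop.
import Mathlib
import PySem

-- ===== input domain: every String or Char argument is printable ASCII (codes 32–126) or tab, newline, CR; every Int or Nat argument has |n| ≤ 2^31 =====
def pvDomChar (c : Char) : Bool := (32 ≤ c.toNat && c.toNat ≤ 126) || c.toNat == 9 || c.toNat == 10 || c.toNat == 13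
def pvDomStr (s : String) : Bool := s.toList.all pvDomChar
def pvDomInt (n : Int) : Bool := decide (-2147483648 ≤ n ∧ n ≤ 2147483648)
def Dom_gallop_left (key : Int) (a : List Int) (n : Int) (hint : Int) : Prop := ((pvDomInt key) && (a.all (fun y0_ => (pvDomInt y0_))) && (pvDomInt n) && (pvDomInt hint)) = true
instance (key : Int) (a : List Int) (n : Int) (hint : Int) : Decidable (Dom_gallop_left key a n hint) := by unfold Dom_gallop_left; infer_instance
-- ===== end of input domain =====

-- B keeps A's observable probe sequence but a different decomposition: one generic
-- predicate-driven gallop helper whose single stopping offset yields both bracket ends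
-- in closed form (prev = t>>1; no lastofs/clamp/overflow bookkeeping), then a recursive
-- bisect helper; same value as A on every admitted input.


-- ===== PORT A =====
-- Each while loop is ported as structural recursion on a fuel that only bounds the
-- iteration count (ofs strictly grows towards maxofs, the binary-search gap shrinks),
-- so the fuel given at the call sites is never exhausted before the loop condition
-- fails; the fuel-0 value is the loop's exit value.

-- right gallop: while ofs < maxofs: if a[ofs+hint] < key: lastofs = ofs; ofs = (ofs<<1)+1; if ofs <= 0: ofs = maxofs; else: break
def pvGrLoop (key : Int) (a : List Int) (hint : Int) (fuel : Nat) (lastofs ofs maxofs : Int) : Int × Int :=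
  match fuel with
  | 0 => (lastofs, ofs)
  | fuel + 1 =>
    if ofs < maxofs then
      if PySem.List.pyGetD a (ofs + hint) 0 < key then
        if (ofs <<< (1:Nat)) + 1 ≤ 0 then
          pvGrLoop key a hint fuel ofs maxofs maxofs
        else
          pvGrLoop key a hint fuel ofs ((ofs <<< (1:Nat)) + 1) maxofs
      else (lastofs, ofs)
    else (lastofs, ofs)

-- left gallop: while ofs < maxofs: if a[hint-ofs] < key: break; lastofs = ofs; ofs = (ofs<<1)+1; if ofs <= 0: ofs = maxofs
def pvGlLoop (key : Int) (a : List Int) (hint : Int) (fuel : Nat) (lastofs ofs maxofs : Int) : Int × Int :=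
  match fuel with
  | 0 => (lastofs, ofs)
  | fuel + 1 =>
    if ofs < maxofs then
      if PySem.List.pyGetD a (hint - ofs) 0 < key then (lastofs, ofs)
      else
        if (ofs <<< (1:Nat)) + 1 ≤ 0 then
          pvGlLoop key a hint fuel ofs maxofs maxofs
        else
          pvGlLoop key a hint fuel ofs ((ofs <<< (1:Nat)) + 1) maxofs
    else (lastofs, ofs)

-- A's final bracketed binary search: while lastofs < ofs: m = lastofs + ((ofs-lastofs)>>1); …; return ofs
def pvBsLoopA (key : Int) (a : List Int) (fuel : Nat) (lastofs ofs : Int) : Int :=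
  match fuel with
  | 0 => ofs
  | fuel + 1 =>
    if lastofs < ofs then
      if PySem.List.pyGetD a (lastofs + ((ofs - lastofs) >>> (1:Nat))) 0 < key then
        pvBsLoopA key a fuel ((lastofs + ((ofs - lastofs) >>> (1:Nat))) + 1) ofs
      else
        pvBsLoopA key a fuel lastofs (lastofs + ((ofs - lastofs) >>> (1:Nat)))
    else ofs

def gallop_left (key : Int) (a : List Int) (n : Int) (hint : Int) : Int :=
  -- assert 0 <= hint < n  (raises outside Pre_)
  let ofs : Int := 1
  let lastofs : Int := 0
  if PySem.List.pyGetD a hint 0 < key then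
    let maxofs := n - hint
    let r := pvGrLoop key a hint (maxofs - ofs).toNat lastofs ofs maxofs
    let ofs' := if r.2 > maxofs then maxofs else r.2
    let lastofs' := r.1 + hint
    let ofs'' := ofs' + hint
    pvBsLoopA key a (ofs'' - (lastofs' + 1)).toNat (lastofs' + 1) ofs''
  else
    let maxofs := hint + 1
    let r := pvGlLoop key a hint (maxofs - ofs).toNat lastofs ofs maxofs
    let ofs' := if r.2 > maxofs then maxofs else r.2
    let k := r.1
    let lastofs' := hint - ofs'
    let ofs'' := hint - k
    pvBsLoopA key a (ofs'' - (lastofs' + 1)).toNat (lastofs' + 1) ofs''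

-- ===== PORT B =====
-- _gallop(ok, t): while ok(t): t = 2*t + 1; return t   (fuel only bounds iterations)
def pvGallop (ok : Int → Bool) (fuel : Nat) (t : Int) : Int :=
  match fuel with
  | 0 => t
  | fuel + 1 => if ok t then pvGallop ok fuel (2 * t + 1) else t

-- _bisect(key, a, lo, hi): recursive leftmost bisection (fuel only bounds the depth)
def pvBisect (key : Int) (a : List Int) (fuel : Nat) (lo hi : Int) : Int :=
  match fuel with
  | 0 => lo
  | fuel + 1 =>
    if hi ≤ lo then lo
    else
      if PySem.List.pyGetD a ((lo + hi) >>> (1:Nat)) 0 < key then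
        pvBisect key a fuel (((lo + hi) >>> (1:Nat)) + 1) hi
      else
        pvBisect key a fuel lo ((lo + hi) >>> (1:Nat))

-- the two lambdas Source B passes to _gallop, as named helpers
def pvOkR (key : Int) (a : List Int) (n : Int) (hint : Int) : Int → Bool :=
  fun u => decide (hint + u < n) && decide (PySem.List.pyGetD a (hint + u) 0 < key)
def pvOkL (key : Int) (a : List Int) (hint : Int) : Int → Bool :=
  fun u => decide (u ≤ hint) && !(decide (PySem.List.pyGetD a (hint - u) 0 < key))

def gallop_left_alt (key : Int) (a : List Int) (n : Int) (hint : Int) : Int :=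
  -- assert 0 <= hint < n  (raises outside Pre_)
  if PySem.List.pyGetD a hint 0 < key then
    let t := pvGallop (pvOkR key a n hint) (n - hint - 1).toNat 1
    let lo := hint + (t >>> (1:Nat)) + 1
    let hi := min (hint + t) n
    pvBisect key a (hi - lo).toNat lo hi
  else
    let t := pvGallop (pvOkL key a hint) hint.toNat 1
    let lo := max (hint - t) (-1) + 1
    let hi := hint - (t >>> (1:Nat))
    pvBisect key a (hi - lo).toNat lo hi

-- ===== PRECONDITION & SPEC =====
-- Pre_ excludes only hint outside [0,n), where both programs raise AssertionError.
-- (When n > len(a), Python may also raise IndexError on the value-dependent inputs whose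
-- probes leave the list; both B and the ports probe the same positions, the ports model
-- each such read as a default read, and A = B still holds for the ports on all of Pre_.)
def Pre_gallop_left (key : Int) (a : List Int) (n : Int) (hint : Int) : Prop :=
  0 ≤ hint ∧ hint < n
instance (key : Int) (a : List Int) (n : Int) (hint : Int) : Decidable (Pre_gallop_left key a n hint) := by unfold Pre_gallop_left; infer_instance

def pvWitness_gallop_left : Int × List Int × Int × Int := (5, [1, 3, 5, 7], 4, 1)

def Spec_gallop_left (key : Int) (a : List Int) (n : Int) (hint : Int) (out : Int) : Prop := out = gallop_left_alt key a n hint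
instance (key : Int) (a : List Int) (n : Int) (hint : Int) (out : Int) : Decidable (Spec_gallop_left key a n hint out) := by unfold Spec_gallop_left; infer_instance

-- ===== CLAIM (what is proved, stated in full; the proofs are below) =====
def Claim_equal_gallop_left : Prop := ∀ (key : Int) (a : List Int) (n : Int) (hint : Int), Dom_gallop_left key a n hint → Pre_gallop_left key a n hint → Spec_gallop_left key a n hint (gallop_left key a n hint)

-- ===== LEMMAS AND PROOFS =====

-- bridge facts for Python's  x << 1  /  x >> 1  on Int
theorem pv_shl1 (x : Int) : x <<< (1:Nat) = 2 * x := by simp [Int.shiftLeft_eq]; ring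
theorem pv_shr1 (x : Int) : x >>> (1:Nat) = x / 2 := by rw [Int.shiftRight_eq_div_pow]; norm_num

-- A's midpoint  lastofs + ((ofs - lastofs) >> 1)  is B's midpoint  (lo + hi) >> 1
theorem pv_mid (lo hi : Int) : lo + ((hi - lo) >>> (1:Nat)) = (lo + hi) >>> (1:Nat) := by
  rw [pv_shr1, pv_shr1]; omega

-- with equal fuel and lo ≤ hi, A's search loop and B's recursive bisect agree step by step
theorem pvBs_eq (key : Int) (a : List Int) :
    ∀ (fuel : Nat) (lo hi : Int), (hi - lo).toNat ≤ fuel → lo ≤ hi →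
      pvBsLoopA key a fuel lo hi = pvBisect key a fuel lo hi := by
  intro fuel
  induction fuel with
  | zero =>
    intro lo hi hf hle
    simp only [pvBsLoopA, pvBisect]
    omega
  | succ fuel ih =>
    intro lo hi hf hle
    simp only [pvBsLoopA, pvBisect]
    rw [pv_mid]
    by_cases hlh : lo < hi
    · rw [if_pos hlh, if_neg (show ¬ (hi ≤ lo) by omega)]
      have hm : lo ≤ (lo + hi) >>> (1:Nat) ∧ (lo + hi) >>> (1:Nat) < hi := by
        rw [pv_shr1]; omega
      by_cases hp : PySem.List.pyGetD a ((lo + hi) >>> (1:Nat)) 0 < key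
      · rw [if_pos hp, if_pos hp]; exact ih _ _ (by omega) (by omega)
      · rw [if_neg hp, if_neg hp]; exact ih _ _ (by omega) (by omega)
    · rw [if_neg hlh, if_pos (show hi ≤ lo by omega)]; omega

-- A's right gallop carries exactly (t/2, t) for B's stopping offset t, with t/2 < n - hint
theorem pvGr_sim (key : Int) (a : List Int) (n hint : Int) :
    ∀ (fuel : Nat) (lastofs t : Int), 0 < t → lastofs = t / 2 → lastofs < n - hint →
      pvGrLoop key a hint fuel lastofs t (n - hint) =
        (pvGallop (pvOkR key a n hint) fuel t / 2, pvGallop (pvOkR key a n hint) fuel t) ∧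
      0 < pvGallop (pvOkR key a n hint) fuel t ∧
      pvGallop (pvOkR key a n hint) fuel t / 2 < n - hint := by
  intro fuel
  induction fuel with
  | zero =>
    intro lastofs t ht hl hlt
    subst hl
    simp only [pvGrLoop, pvGallop]
    exact ⟨by trivial, ht, hlt⟩
  | succ fuel ih =>
    intro lastofs t ht hl hlt
    subst hl
    by_cases hc : t < n - hint
    · by_cases hp : PySem.List.pyGetD a (hint + t) 0 < key
      · have hG : pvGallop (pvOkR key a n hint) (fuel + 1) t
            = pvGallop (pvOkR key a n hint) fuel (2 * t + 1) := by
          simp only [pvGallop, pvOkR]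
          rw [if_pos (by simp [hp]; omega)]
        rw [hG]
        simp only [pvGrLoop]
        rw [if_pos hc, show t + hint = hint + t from by ring, if_pos hp, pv_shl1,
          if_neg (show ¬ (2 * t + 1 ≤ 0) by omega)]
        exact ih t (2 * t + 1) (by omega) (by omega) (by omega)
      · have hG : pvGallop (pvOkR key a n hint) (fuel + 1) t = t := by
          simp only [pvGallop, pvOkR]
          rw [if_neg (by simp [hp])]
        rw [hG]
        simp only [pvGrLoop]
        rw [if_pos hc, show t + hint = hint + t from by ring, if_neg hp]
        exact ⟨by trivial, ht, hlt⟩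
    · have hG : pvGallop (pvOkR key a n hint) (fuel + 1) t = t := by
        simp only [pvGallop, pvOkR]
        rw [if_neg (by simp; omega)]
      rw [hG]
      simp only [pvGrLoop]
      rw [if_neg hc]
      exact ⟨by trivial, ht, hlt⟩

-- A's left gallop carries exactly (t/2, t) for B's stopping offset t, with t/2 ≤ hint
theorem pvGl_sim (key : Int) (a : List Int) (hint : Int) :
    ∀ (fuel : Nat) (lastofs t : Int), 0 < t → lastofs = t / 2 → lastofs ≤ hint →
      pvGlLoop key a hint fuel lastofs t (hint + 1) =
        (pvGallop (pvOkL key a hint) fuel t / 2, pvGallop (pvOkL key a hint) fuel t) ∧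
      0 < pvGallop (pvOkL key a hint) fuel t ∧
      pvGallop (pvOkL key a hint) fuel t / 2 ≤ hint := by
  intro fuel
  induction fuel with
  | zero =>
    intro lastofs t ht hl hle
    subst hl
    simp only [pvGlLoop, pvGallop]
    exact ⟨by trivial, ht, hle⟩
  | succ fuel ih =>
    intro lastofs t ht hl hle
    subst hl
    by_cases hc : t < hint + 1
    · by_cases hp : PySem.List.pyGetD a (hint - t) 0 < key
      · have hG : pvGallop (pvOkL key a hint) (fuel + 1) t = t := by
          simp only [pvGallop, pvOkL]
          rw [if_neg (by simp [hp])]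
        rw [hG]
        simp only [pvGlLoop]
        rw [if_pos hc, if_pos hp]
        exact ⟨by trivial, ht, hle⟩
      · have hG : pvGallop (pvOkL key a hint) (fuel + 1) t
            = pvGallop (pvOkL key a hint) fuel (2 * t + 1) := by
          simp only [pvGallop, pvOkL]
          rw [if_pos (by simp [hp]; omega)]
        rw [hG]
        simp only [pvGlLoop]
        rw [if_pos hc, if_neg hp, pv_shl1, if_neg (show ¬ (2 * t + 1 ≤ 0) by omega)]
        exact ih t (2 * t + 1) (by omega) (by omega) (by omega)
    · have hG : pvGallop (pvOkL key a hint) (fuel + 1) t = t := by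
        simp only [pvGallop, pvOkL]
        rw [if_neg (by simp; omega)]
      rw [hG]
      simp only [pvGlLoop]
      rw [if_neg hc]
      exact ⟨by trivial, ht, hle⟩

-- ===== VERDICT (by name: the statement is the Claim_ definition above) =====
theorem gallop_left_spec : Claim_equal_gallop_left := by
  intro key a n hint _hdom hpre
  obtain ⟨hh0, hhn⟩ := hpre
  unfold Spec_gallop_left
  simp only [gallop_left, gallop_left_alt]
  by_cases h0 : PySem.List.pyGetD a hint 0 < key
  · rw [if_pos h0, if_pos h0]
    obtain ⟨hsim, hpos, hbnd⟩ :=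
      pvGr_sim key a n hint (n - hint - 1).toNat 0 1 (by omega) (by decide) (by omega)
    rw [hsim]
    set g := pvGallop (pvOkR key a n hint) (n - hint - 1).toNat 1 with hg
    rw [show g / 2 + hint + 1 = hint + g >>> (1:Nat) + 1 from by rw [pv_shr1]; ring,
      show (if g > n - hint then n - hint else g) + hint = min (hint + g) n from by
        split_ifs <;> omega]
    exact pvBs_eq key a _ _ _ (le_refl _) (by rw [pv_shr1]; omega)
  · rw [if_neg h0, if_neg h0]
    obtain ⟨hsim, hpos, hbnd⟩ :=
      pvGl_sim key a hint (hint + 1 - 1).toNat 0 1 (by omega) (by decide) (by omega)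
    rw [show (hint + 1 - 1 : Int) = hint from by ring] at hsim ⊢
    rw [hsim]
    set g := pvGallop (pvOkL key a hint) hint.toNat 1 with hg
    rw [show hint - (if g > hint + 1 then hint + 1 else g) + 1 = max (hint - g) (-1) + 1 from by
        split_ifs <;> omega,
      show hint - g / 2 = hint - g >>> (1:Nat) from by rw [pv_shr1]]
    rw [show (hint + 1 - 1 : Int) = hint from by ring] at hpos hbnd
    exact pvBs_eq key a _ _ _ (le_refl _) (by rw [pv_shr1]; omega)
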